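-- pv_equiv track=rewrite | github.com/ZettaAI/seuron | dags/synaptor/pinky40.py | chunk_bboxes
-- ===== SOURCE A (Python) =====
-- import itertools
-- import operator
--
-- def chunk_bboxes(vol_size, chunk_size, offset=None):
--
--     x_bnds = bounds1D(vol_size[0], chunk_size[0])
--     y_bnds = bounds1D(vol_size[1], chunk_size[1])
--     z_bnds = bounds1D(vol_size[2], chunk_size[2])
--
--     bboxes = [tuple(zip(xs, ys, zs))
--               for (xs, ys, zs) in itertools.product(x_bnds, y_bnds, z_bnds)]
--
--     if offset is not None:
--         bboxes = [(tuple(map(operator.add, bb[0], offset)),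
--                    tuple(map(operator.add, bb[1], offset)))
--                   for bb in bboxes]
--
--     return bboxes
--
-- def bounds1D(full_width, step_size):
--
--     assert step_size > 0, "invalid step_size: {}".format(step_size)
--     assert full_width > 0, "invalid volume_width: {}".format(full_width)
--
--     start = 0
--     end = step_size
--
--     bounds = []
--     while end < full_width:
--         bounds.append((start, end))
--
--         start += step_size
--         end += step_size
--
--     # last window
--     bounds.append((start, end))
--
--     return bounds
-- ===== SOURCE B (Python) =====
-- import operator
--
-- def chunk_bboxes(vol_size, chunk_size, offset=None):
--     steps = []
--     counts = []
--     for axis in range(3):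
--         w = vol_size[axis]
--         s = chunk_size[axis]
--         assert s > 0, "invalid step_size: {}".format(s)
--         assert w > 0, "invalid volume_width: {}".format(w)
--         steps.append(s)
--         counts.append((w - 1) // s + 1)
--     sx, sy, sz = steps
--     nx, ny, nz = counts
--
--     bboxes = []
--     for k in range(nx * ny * nz):
--         iz = k % nz
--         iy = (k // nz) % ny
--         ix = k // (nz * ny)
--         lo = (ix * sx, iy * sy, iz * sz)
--         hi = (lo[0] + sx, lo[1] + sy, lo[2] + sz)
--         if offset is not None:
--             lo = tuple(map(operator.add, lo, offset))
--             hi = tuple(map(operator.add, hi, offset))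
--         bboxes.append((lo, hi))
--     return bboxes
-- ===== Notes on version B (the rewrite author's own statement) =====
-- stated objective: alternative
-- what changed: Instead of building three per-axis bounds lists and taking their 3-way Cartesian product with a post-pass that adds the offset, B runs one flat loop over the linear chunk index k in range(nx*ny*nz), decodes (ix,iy,iz) by divmod arithmetic, computes each box's corners directly from the indices, and applies the offset inline while appending.
import Mathlib
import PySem

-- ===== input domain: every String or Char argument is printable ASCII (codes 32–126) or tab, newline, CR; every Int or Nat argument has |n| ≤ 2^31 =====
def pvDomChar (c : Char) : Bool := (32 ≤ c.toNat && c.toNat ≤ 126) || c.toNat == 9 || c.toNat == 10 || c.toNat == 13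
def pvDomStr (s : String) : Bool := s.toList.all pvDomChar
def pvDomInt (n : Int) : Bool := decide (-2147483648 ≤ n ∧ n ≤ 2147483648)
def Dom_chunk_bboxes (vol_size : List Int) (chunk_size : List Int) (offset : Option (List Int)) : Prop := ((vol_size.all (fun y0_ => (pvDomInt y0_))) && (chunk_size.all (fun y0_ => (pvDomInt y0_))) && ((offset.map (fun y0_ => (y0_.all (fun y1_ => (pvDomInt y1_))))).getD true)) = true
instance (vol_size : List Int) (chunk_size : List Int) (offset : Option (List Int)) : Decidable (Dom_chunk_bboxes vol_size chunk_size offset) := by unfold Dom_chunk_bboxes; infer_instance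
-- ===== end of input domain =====

-- B replaces the per-axis bounds lists + Cartesian product + offset post-pass by a single flat
-- loop over the linear chunk index with divmod decoding and inline offset. Return value only.

-- ===== PORT A =====
-- while end < full_width: append (start,end); start+=step; end+=step  -- then append last window
def pvLoopA (full_width step : Int) (hstep : 0 < step) (start e : Int)
    (acc : List (Int × Int)) : List (Int × Int) :=
  if _h : e < full_width then
    pvLoopA full_width step hstep (start + step) (e + step) (acc ++ [(start, e)])
  else
    acc ++ [(start, e)]
termination_by (full_width - e).toNat
decreasing_by omega

-- bounds1D: the asserts raise AssertionError unless step_size > 0 and full_width > 0;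
-- those inputs are excluded by Pre_, the port returns [] there (guard for totality only).
def pvBounds1D_A (full_width step : Int) : List (Int × Int) :=
  if h : 0 < step ∧ 0 < full_width then
    pvLoopA full_width step h.1 0 step []
  else []

def chunk_bboxes (vol_size : List Int) (chunk_size : List Int) (offset : Option (List Int)) : List (List Int × List Int) :=
  let x_bnds := pvBounds1D_A (PySem.List.pyGetD vol_size 0 0) (PySem.List.pyGetD chunk_size 0 0)
  let y_bnds := pvBounds1D_A (PySem.List.pyGetD vol_size 1 0) (PySem.List.pyGetD chunk_size 1 0)
  let z_bnds := pvBounds1D_A (PySem.List.pyGetD vol_size 2 0) (PySem.List.pyGetD chunk_size 2 0)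
  -- itertools.product + tuple(zip(xs, ys, zs))
  let bboxes := x_bnds.flatMap (fun xs => y_bnds.flatMap (fun ys => z_bnds.map (fun zs =>
    ([xs.1, ys.1, zs.1], [xs.2, ys.2, zs.2]))))
  match offset with
  | some off =>
      -- tuple(map(operator.add, bb[i], offset)): map over two iterables truncates at the shorter
      bboxes.map (fun bb => (List.zipWith (· + ·) bb.1 off, List.zipWith (· + ·) bb.2 off))
  | none => bboxes

-- ===== PORT B =====
-- axis loop computes steps (sx,sy,sz) and window counts (nx,ny,nz); asserts raise outside the
-- guard (excluded by Pre_, port returns [] there for totality only); then one flat loop over k.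
def chunk_bboxes_alt (vol_size : List Int) (chunk_size : List Int) (offset : Option (List Int)) : List (List Int × List Int) :=
  let wx := PySem.List.pyGetD vol_size 0 0
  let sx := PySem.List.pyGetD chunk_size 0 0
  let wy := PySem.List.pyGetD vol_size 1 0
  let sy := PySem.List.pyGetD chunk_size 1 0
  let wz := PySem.List.pyGetD vol_size 2 0
  let sz := PySem.List.pyGetD chunk_size 2 0
  if 0 < sx ∧ 0 < wx ∧ 0 < sy ∧ 0 < wy ∧ 0 < sz ∧ 0 < wz then
    let nx := PySem.Int.floordiv (wx - 1) sx + 1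
    let ny := PySem.Int.floordiv (wy - 1) sy + 1
    let nz := PySem.Int.floordiv (wz - 1) sz + 1
    (PySem.List.pyRange 0 (nx * ny * nz) 1).map (fun k =>
      let iz := PySem.Int.mod k nz
      let iy := PySem.Int.mod (PySem.Int.floordiv k nz) ny
      let ix := PySem.Int.floordiv k (nz * ny)
      let lo := [ix * sx, iy * sy, iz * sz]
      let hi := [ix * sx + sx, iy * sy + sy, iz * sz + sz]
      match offset with
      | some off => (List.zipWith (· + ·) lo off, List.zipWith (· + ·) hi off)
      | none => (lo, hi))
  else []

-- ===== PRECONDITION & SPEC =====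
-- Pre_ excludes exactly the inputs where Python A raises: IndexError if either list has
-- fewer than 3 entries, AssertionError if any of the first three chunk/vol entries is ≤ 0.
def Pre_chunk_bboxes (vol_size : List Int) (chunk_size : List Int) (offset : Option (List Int)) : Prop :=
  3 ≤ vol_size.length ∧ 3 ≤ chunk_size.length ∧
  0 < vol_size.getD 0 0 ∧ 0 < vol_size.getD 1 0 ∧ 0 < vol_size.getD 2 0 ∧
  0 < chunk_size.getD 0 0 ∧ 0 < chunk_size.getD 1 0 ∧ 0 < chunk_size.getD 2 0
instance (vol_size : List Int) (chunk_size : List Int) (offset : Option (List Int)) : Decidable (Pre_chunk_bboxes vol_size chunk_size offset) := by unfold Pre_chunk_bboxes; infer_instance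

def pvWitness_chunk_bboxes : List Int × List Int × Option (List Int) := ([5, 3, 4], [2, 3, 2], some [10, 20, 30])
def Spec_chunk_bboxes (vol_size : List Int) (chunk_size : List Int) (offset : Option (List Int)) (out : List (List Int × List Int)) : Prop := out = chunk_bboxes_alt vol_size chunk_size offset
instance (vol_size : List Int) (chunk_size : List Int) (offset : Option (List Int)) (out : List (List Int × List Int)) : Decidable (Spec_chunk_bboxes vol_size chunk_size offset out) := by unfold Spec_chunk_bboxes; infer_instance

-- ===== CLAIM =====
def Claim_equal_chunk_bboxes : Prop := ∀ (vol_size : List Int) (chunk_size : List Int) (offset : Option (List Int)), Dom_chunk_bboxes vol_size chunk_size offset → Pre_chunk_bboxes vol_size chunk_size offset → Spec_chunk_bboxes vol_size chunk_size offset (chunk_bboxes vol_size chunk_size offset)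

-- ===== LEMMAS AND PROOFS =====
-- A's while loop produces the closed-form window list.
lemma pvLoopA_eq (fw step : Int) (h : 0 < step) (i : Int)
    (hin : i < PySem.Int.floordiv (fw - 1) step + 1) (acc : List (Int × Int)) :
    pvLoopA fw step h (i * step) ((i + 1) * step) acc =
      acc ++ (PySem.List.pyRange i (PySem.Int.floordiv (fw - 1) step + 1) 1).map
        (fun j => (j * step, (j + 1) * step)) := by
  rw [pvLoopA]
  rw [PySem.List.pyRange_one_cons hin]
  by_cases hc : (i + 1) * step < fw
  · rw [dif_pos hc]
    have hlt : i + 1 < PySem.Int.floordiv (fw - 1) step + 1 := by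
      have := (PySem.Int.le_floordiv_iff_mul_le (a := fw - 1) (b := step) (q := i + 1) h).2
        (by omega)
      omega
    have hrec := pvLoopA_eq fw step h (i + 1) hlt (acc ++ [(i * step, (i + 1) * step)])
    rw [show (i + 1) * step + step = (i + 1 + 1) * step by ring,
        show i * step + step = (i + 1) * step by ring] at *
    rw [hrec]
    simp
  · rw [dif_neg hc]
    have hend : PySem.Int.floordiv (fw - 1) step + 1 ≤ i + 1 := by
      by_contra hlt
      have h2 := (PySem.Int.le_floordiv_iff_mul_le (a := fw - 1) (b := step) (q := i + 1) h).1
        (by omega)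
      omega
    rw [PySem.List.pyRange_one_eq_nil hend]
    simp
termination_by (fw - (i + 1) * step).toNat
decreasing_by
  have h1 : (i + 1 + 1) * step = (i + 1) * step + step := by ring
  omega

lemma pvBoundsA_eq (fw step : Int) (h : 0 < step ∧ 0 < fw) :
    pvBounds1D_A fw step =
      (PySem.List.pyRange 0 (PySem.Int.floordiv (fw - 1) step + 1) 1).map
        (fun j => (j * step, (j + 1) * step)) := by
  unfold pvBounds1D_A
  rw [dif_pos h]
  have hn : (0 : Int) < PySem.Int.floordiv (fw - 1) step + 1 := by
    have := (PySem.Int.le_floordiv_iff_mul_le (a := fw - 1) (b := step) (q := 0) h.1).2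
      (by omega)
    omega
  have := pvLoopA_eq fw step h.1 0 hn []
  simpa using this

-- range(m*n) with divmod decoding = nested ranges (Nat version).
lemma range_prod2 {α : Type} (m n : Nat) (g : Nat → Nat → α) :
    (List.range (m * n)).map (fun k => g (k / n) (k % n)) =
      (List.range m).flatMap (fun i => (List.range n).map (g i)) := by
  induction m with
  | zero => simp
  | succ m ih =>
    rcases Nat.eq_zero_or_pos n with hn | hn
    · subst hn; simp
    · have hs : (m + 1) * n = m * n + n := by ring
      rw [hs, List.range_add, List.map_append, ih, List.range_succ, List.flatMap_append]
      congr 1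
      · simp only [List.map_map, List.flatMap_singleton]
        apply List.map_congr_left
        intro j hj
        have hj' : j < n := List.mem_range.mp hj
        have hd : (m * n + j) / n = m := by
          rw [Nat.add_comm, Nat.add_mul_div_right _ _ hn, Nat.div_eq_of_lt hj', Nat.zero_add]
        have hm : (m * n + j) % n = j := by
          rw [Nat.add_comm, Nat.add_mul_mod_self_right, Nat.mod_eq_of_lt hj']
        simp [hd, hm]

lemma range_prod3 {α : Type} (a b c : Nat) (f : Nat → Nat → Nat → α) :
    (List.range (a * b * c)).map (fun k => f (k / (c * b)) (k / c % b) (k % c)) =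
      (List.range a).flatMap (fun i =>
        (List.range b).flatMap (fun j => (List.range c).map (fun l => f i j l))) := by
  calc (List.range (a * b * c)).map (fun k => f (k / (c * b)) (k / c % b) (k % c))
      = (List.range (a * (b * c))).map
          (fun k => f (k / (b * c)) (k % (b * c) / c) (k % (b * c) % c)) := by
        rw [Nat.mul_assoc]
        apply List.map_congr_left
        intro k _
        rw [show k % (b * c) / c = k / c % b from by
              rw [Nat.mul_comm b c]; exact Nat.mod_mul_right_div_self k c b,
            Nat.mod_mul_left_mod, Nat.mul_comm c b]
    _ = (List.range a).flatMap
          (fun i => (List.range (b * c)).map (fun r => f i (r / c) (r % c))) :=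
        range_prod2 a (b * c) (fun i r => f i (r / c) (r % c))
    _ = _ := by
        refine congrArg (fun g => List.flatMap g (List.range a)) ?_
        funext i
        exact range_prod2 b c (f i)

-- Int version of the divmod/product identity, for positive counts.
lemma prod_eq {α : Type} (nx ny nz : Int) (hx : 0 < nx) (hy : 0 < ny) (hz : 0 < nz)
    (F : Int → Int → Int → α) :
    (PySem.List.pyRange 0 (nx * ny * nz) 1).map (fun k =>
        F (PySem.Int.floordiv k (nz * ny)) (PySem.Int.mod (PySem.Int.floordiv k nz) ny)
          (PySem.Int.mod k nz)) =
      (PySem.List.pyRange 0 nx 1).flatMap (fun i =>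
        (PySem.List.pyRange 0 ny 1).flatMap (fun j =>
          (PySem.List.pyRange 0 nz 1).map (fun l => F i j l))) := by
  obtain ⟨a, rfl⟩ := Int.eq_ofNat_of_zero_le hx.le
  obtain ⟨b, rfl⟩ := Int.eq_ofNat_of_zero_le hy.le
  obtain ⟨c, rfl⟩ := Int.eq_ofNat_of_zero_le hz.le
  have hcast : (a : Int) * b * c = ((a * b * c : Nat) : Int) := by push_cast; ring
  simp only [hcast, PySem.List.pyRange_zero_nat, List.flatMap_map, List.map_map,
    Function.comp_def]
  refine Eq.trans ?_ (range_prod3 a b c (fun i j l => F (i : Int) (j : Int) (l : Int)))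
  apply List.map_congr_left
  intro k _
  have h1 : (c : Int) * b = ((c * b : Nat) : Int) := by push_cast; ring
  simp only [h1, PySem.Int.floordiv_natCast, PySem.Int.mod_natCast]

-- ===== VERDICT =====
theorem chunk_bboxes_spec : Claim_equal_chunk_bboxes := by
  intro vol chunk off _ hpre
  obtain ⟨hl1, hl2, hv0, hv1, hv2, hc0, hc1, hc2⟩ := hpre
  have ev0 : PySem.List.pyGetD vol 0 (0:Int) = vol.getD 0 0 := by simp [pysem]
  have ev1 : PySem.List.pyGetD vol 1 (0:Int) = vol.getD 1 0 := by simp [pysem]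
  have ev2 : PySem.List.pyGetD vol 2 (0:Int) = vol.getD 2 0 := by simp [pysem]
  have ec0 : PySem.List.pyGetD chunk 0 (0:Int) = chunk.getD 0 0 := by simp [pysem]
  have ec1 : PySem.List.pyGetD chunk 1 (0:Int) = chunk.getD 1 0 := by simp [pysem]
  have ec2 : PySem.List.pyGetD chunk 2 (0:Int) = chunk.getD 2 0 := by simp [pysem]
  unfold Spec_chunk_bboxes chunk_bboxes chunk_bboxes_alt
  simp only [ev0, ev1, ev2, ec0, ec1, ec2]
  rw [if_pos ⟨hc0, hv0, hc1, hv1, hc2, hv2⟩]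
  rw [pvBoundsA_eq _ _ ⟨hc0, hv0⟩, pvBoundsA_eq _ _ ⟨hc1, hv1⟩, pvBoundsA_eq _ _ ⟨hc2, hv2⟩]
  set sx := chunk.getD 0 0
  set sy := chunk.getD 1 0
  set sz := chunk.getD 2 0
  set nx := PySem.Int.floordiv (vol.getD 0 0 - 1) sx + 1 with hnx
  set ny := PySem.Int.floordiv (vol.getD 1 0 - 1) sy + 1 with hny
  set nz := PySem.Int.floordiv (vol.getD 2 0 - 1) sz + 1 with hnz
  have hpx : 0 < nx := by
    have := (PySem.Int.le_floordiv_iff_mul_le (a := vol.getD 0 0 - 1) (b := sx) (q := 0) hc0).2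
      (by omega)
    omega
  have hpy : 0 < ny := by
    have := (PySem.Int.le_floordiv_iff_mul_le (a := vol.getD 1 0 - 1) (b := sy) (q := 0) hc1).2
      (by omega)
    omega
  have hpz : 0 < nz := by
    have := (PySem.Int.le_floordiv_iff_mul_le (a := vol.getD 2 0 - 1) (b := sz) (q := 0) hc2).2
      (by omega)
    omega
  cases off with
  | none =>
    simp only [List.flatMap_map, List.map_map, Function.comp_def]
    refine Eq.trans ((prod_eq nx ny nz hpx hpy hpz
      (fun i j l => ([i * sx, j * sy, l * sz],
        [(i + 1) * sx, (j + 1) * sy, (l + 1) * sz]))).symm) ?_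
    apply List.map_congr_left
    intro k _
    simp only [add_mul, one_mul]
  | some o =>
    simp only [List.map_flatMap, List.map_map, List.flatMap_map, Function.comp_def]
    refine Eq.trans ((prod_eq nx ny nz hpx hpy hpz
      (fun i j l => (List.zipWith (· + ·) [i * sx, j * sy, l * sz] o,
        List.zipWith (· + ·) [(i + 1) * sx, (j + 1) * sy, (l + 1) * sz] o))).symm) ?_
    apply List.map_congr_left
    intro k _
    simp only [add_mul, one_mul]
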